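-- pv_equiv track=rewrite | github.com/nlaveck/advent-of-code | 2023/day12/12_2.py | firstCount
-- ===== SOURCE A (Python) =====
-- def firstCount(springs: str):
--     if '#' in springs:
--         idx = springs.index('#')
--         count = 1
--         while idx + count < len(springs) and springs[idx+count] == '#':
--             count += 1
--         return count
--     else:
--         return 0
-- ===== SOURCE B (Python) =====
-- def firstCount(springs: str):
--     chunks = ''.join(c if c == '#' else ' ' for c in springs).split()
--     return len(chunks[0]) if chunks else 0
-- ===== Notes on version B (the rewrite author's own statement) =====
-- stated objective: alternative
-- what changed: Instead of locating the first '#' with index() and counting forward with a while loop, B maps every non-'#' character to a space, whitespace-splits the result so the chunks are exactly the maximal '#'-runs, and returns the length of the first chunk (0 if there is none) -- no index, no counter, no loop of its own.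
import Mathlib
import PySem

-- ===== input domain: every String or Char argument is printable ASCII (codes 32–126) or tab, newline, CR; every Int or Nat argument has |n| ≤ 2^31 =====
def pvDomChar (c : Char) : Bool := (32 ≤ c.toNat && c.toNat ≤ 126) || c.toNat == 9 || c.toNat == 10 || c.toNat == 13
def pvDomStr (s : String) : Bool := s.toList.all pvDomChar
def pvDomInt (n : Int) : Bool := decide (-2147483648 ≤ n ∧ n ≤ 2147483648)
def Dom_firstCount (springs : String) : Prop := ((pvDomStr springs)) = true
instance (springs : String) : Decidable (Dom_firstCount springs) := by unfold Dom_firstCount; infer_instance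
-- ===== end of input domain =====

-- B masks every non-'#' character to a space, whitespace-splits, and returns the length of
-- the first chunk (0 if none) instead of A's index()-then-while counting (objective: alternative).

-- ===== PORT A =====
-- the while loop: while idx + count < len(springs) and springs[idx+count] == '#': count += 1
def firstCountLoop (l : List Char) (idx count : Nat) : Nat :=
  if h : idx + count < l.length ∧ l[idx+count]? = some '#' then
    firstCountLoop l idx (count + 1)
  else count
termination_by l.length - (idx + count)
decreasing_by omega

def firstCount (springs : String) : Int :=
  let l := springs.toList
  if '#' ∈ l then
    let idx := (PySem.List.index? l '#').getD 0
    (firstCountLoop l idx 1 : Int)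
  else 0

-- ===== PORT B =====
-- chunks = ''.join(c if c == '#' else ' ' for c in springs).split(); len(chunks[0]) if chunks else 0
def firstCount_alt (springs : String) : Int :=
  let chunks := PySem.Chars.split₀ (springs.toList.map (fun c => if c = '#' then c else ' '))
  match chunks with
  | [] => 0
  | w :: _ => (w.length : Int)

-- ===== PRECONDITION & SPEC =====
def Spec_firstCount (springs : String) (out : Int) : Prop := out = firstCount_alt springs
instance (springs : String) (out : Int) : Decidable (Spec_firstCount springs out) := by unfold Spec_firstCount; infer_instance

-- ===== CLAIM (what is proved, stated in full; the proofs are below) =====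
def Claim_equal_firstCount : Prop := ∀ (springs : String), Dom_firstCount springs → Spec_firstCount springs (firstCount springs)

-- ===== LEMMAS AND PROOFS =====

-- A's loop counts count plus the length of the '#'-run starting at position idx+count
lemma firstCountLoop_eq (l : List Char) (idx : Nat) :
    ∀ n count, l.length - (idx + count) = n →
      firstCountLoop l idx count
        = count + ((l.drop (idx + count)).takeWhile (fun c => c == '#')).length := by
  intro n
  induction n with
  | zero =>
    intro count hc
    rw [firstCountLoop]
    have hge : l.length ≤ idx + count := by omega
    rw [List.drop_eq_nil_of_le hge]
    simp [Nat.not_lt_of_le hge]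
  | succ n ih =>
    intro count hc
    have hlt : idx + count < l.length := by omega
    rw [firstCountLoop]
    by_cases hch : l[idx + count]? = some '#'
    · rw [dif_pos ⟨hlt, hch⟩, ih (count + 1) (by omega)]
      have hdrop : l.drop (idx + count) = l[idx + count] :: l.drop (idx + count + 1) :=
        (List.getElem_cons_drop hlt).symm
      have hhd : l[idx + count] = '#' := by
        have := List.getElem?_eq_getElem hlt
        rw [this] at hch; exact Option.some_injective _ hch
      rw [hdrop, hhd, List.takeWhile_cons]
      have hc1 : idx + (count + 1) = idx + count + 1 := by omega
      rw [hc1]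
      simp
      omega
    · rw [dif_neg (by intro h; exact hch h.2)]
      have hdrop : l.drop (idx + count) = l[idx + count] :: l.drop (idx + count + 1) :=
        (List.getElem_cons_drop hlt).symm
      have hhd : l[idx + count] ≠ '#' := by
        intro h
        apply hch
        rw [List.getElem?_eq_getElem hlt, h]
      rw [hdrop, List.takeWhile_cons]
      simp [hhd]

-- A's port equals the first-run formula
lemma firstCount_eq_formula (l : List Char) :
    (if '#' ∈ l then ((firstCountLoop l ((PySem.List.index? l '#').getD 0) 1 : Nat) : Int) else 0)
      = (((l.dropWhile (fun c => !(c == '#'))).takeWhile (fun c => c == '#')).length : Int) := by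
  by_cases hm : '#' ∈ l
  · rw [if_pos hm]
    obtain ⟨k, hk⟩ := (PySem.List.index?_isSome_iff (xs := l) (v := '#')).mpr hm |> Option.isSome_iff_exists.mp
    obtain ⟨pre, suf, hdecomp, hlen, hnot⟩ := (PySem.List.index?_eq_some_iff l '#' k).mp hk
    rw [hk]
    simp only [Option.getD_some]
    rw [firstCountLoop_eq l k (l.length - (k + 1)) 1 rfl]
    have hdropk : l.drop (k + 1) = suf := by
      subst hdecomp
      have h2 : pre ++ '#' :: suf = (pre ++ ['#']) ++ suf := by simp
      have h3 : k + 1 = (pre ++ ['#']).length := by simp [hlen]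
      rw [h2, h3, List.drop_left]
    have hdw : l.dropWhile (fun c => !(c == '#')) = '#' :: suf := by
      subst hdecomp
      rw [List.dropWhile_append]
      have : pre.dropWhile (fun c => !(c == '#')) = [] := by
        rw [List.dropWhile_eq_nil_iff]
        intro x hx
        simp
        intro hxe; exact hnot (hxe ▸ hx)
      simp [this]
    rw [hdropk, hdw, List.takeWhile_cons]
    simp
    omega
  · rw [if_neg hm]
    have : l.dropWhile (fun c => !(c == '#')) = [] := by
      rw [List.dropWhile_eq_nil_iff]
      intro x hx
      simp
      intro hxe; exact hm (hxe ▸ hx)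
    simp [this]

-- split₀.go with a non-empty accumulator prepends the already-collected words
lemma split0_go_acc (m : List Char) :
    ∀ cur acc, PySem.Chars.split₀.go m cur acc
      = acc.reverse ++ PySem.Chars.split₀.go m cur [] := by
  induction m with
  | nil =>
    intro cur acc
    rw [PySem.Chars.split₀.go, PySem.Chars.split₀.go]
    by_cases h : cur.isEmpty = true <;> simp [h]
  | cons c rest ih =>
    intro cur acc
    rw [PySem.Chars.split₀.go, PySem.Chars.split₀.go]
    by_cases hs : PySem.Chars.isspace c = true
    · by_cases he : cur.isEmpty = true
      · simp only [hs, he, if_true]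
        exact ih [] acc
      · simp only [hs, he, if_true, Bool.false_eq_true, if_false]
        rw [ih [] (cur.reverse :: acc), ih [] [cur.reverse]]
        simp
    · simp only [hs, Bool.false_eq_true, if_false]
      exact ih (c :: cur) acc

-- leading whitespace is skipped
lemma split0_go_skip (m : List Char) :
    PySem.Chars.split₀.go m [] []
      = PySem.Chars.split₀.go (m.dropWhile PySem.Chars.isspace) [] [] := by
  induction m with
  | nil => rfl
  | cons c rest ih =>
    by_cases hs : PySem.Chars.isspace c = true
    · rw [List.dropWhile_cons_of_pos (by simpa using hs), ← ih, PySem.Chars.split₀.go]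
      simp [hs]
    · rw [List.dropWhile_cons_of_neg (by simpa using hs)]

-- a non-empty current word becomes the first word: it extends by the non-space prefix
lemma split0_go_word (m : List Char) :
    ∀ cur, cur ≠ [] →
      PySem.Chars.split₀.go m cur []
        = (cur.reverse ++ m.takeWhile (fun c => !PySem.Chars.isspace c))
            :: PySem.Chars.split₀.go (m.dropWhile (fun c => !PySem.Chars.isspace c)) [] [] := by
  induction m with
  | nil =>
    intro cur hc
    rw [PySem.Chars.split₀.go]
    have : cur.isEmpty = false := by simpa [List.isEmpty_iff] using hc
    simp [this]
    rfl
  | cons c rest ih =>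
    intro cur hc
    by_cases hs : PySem.Chars.isspace c = true
    · have hne : cur.isEmpty = false := by simpa [List.isEmpty_iff] using hc
      rw [PySem.Chars.split₀.go]
      simp only [hs, hne, if_true, Bool.false_eq_true, if_false]
      rw [split0_go_acc rest [] [cur.reverse]]
      have h2 : PySem.Chars.split₀.go (c :: rest) [] [] = PySem.Chars.split₀.go rest [] [] := by
        rw [PySem.Chars.split₀.go]; simp [hs]
      rw [List.takeWhile_cons_of_neg (by simp [hs]), List.dropWhile_cons_of_neg (by simp [hs]), h2]
      simp
    · rw [PySem.Chars.split₀.go]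
      simp only [hs, Bool.false_eq_true, if_false]
      rw [ih (c :: cur) (by simp)]
      rw [List.takeWhile_cons_of_pos (by simp [hs]), List.dropWhile_cons_of_pos (by simp [hs])]
      simp

lemma isspace_mask : (PySem.Chars.isspace ∘ fun c => if c = '#' then c else ' ')
    = fun c => !(c == '#') := by
  funext c
  by_cases h : c = '#'
  · subst h; decide
  · have h1 : PySem.Chars.isspace ' ' = true := by decide
    simp [h, h1]

-- B's port equals the first-run formula
lemma firstCount_alt_eq_formula (l : List Char) :
    (match PySem.Chars.split₀ (l.map (fun c => if c = '#' then c else ' ')) with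
      | [] => (0 : Int)
      | w :: _ => (w.length : Int))
      = (((l.dropWhile (fun c => !(c == '#'))).takeWhile (fun c => c == '#')).length : Int) := by
  unfold PySem.Chars.split₀
  rw [split0_go_skip, List.dropWhile_map, isspace_mask]
  rcases hdrop : l.dropWhile (fun c => !(c == '#')) with _ | ⟨d, t⟩
  · simp [PySem.Chars.split₀.go]
  · have hd : d = '#' := by
      have := List.head_dropWhile_not (p := fun c => !(c == '#')) (l := l)
      rw [hdrop] at this
      simpa using this (by simp)
    subst hd
    rw [show (List.map (fun c => if c = '#' then c else ' ') ('#' :: t))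
        = '#' :: List.map (fun c => if c = '#' then c else ' ') t from by simp]
    rw [PySem.Chars.split₀.go]
    have hsp : PySem.Chars.isspace '#' = false := by decide
    simp only [hsp, Bool.false_eq_true, if_false]
    rw [split0_go_word _ ['#'] (by simp)]
    have hneg : (fun c => !PySem.Chars.isspace c) ∘ (fun c => if c = '#' then c else ' ')
        = fun c => c == '#' := by
      funext c
      have := congrFun isspace_mask c
      simp only [Function.comp] at this ⊢
      rw [this]
      simp
    have htw : (t.map (fun c => if c = '#' then c else ' ')).takeWhile (fun c => !PySem.Chars.isspace c)
        = (t.takeWhile (fun c => c == '#')).map (fun c => if c = '#' then c else ' ') := by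
      rw [List.takeWhile_map, hneg]
    rw [htw]
    have htk : (('#' :: t).takeWhile (fun c => c == '#')) = '#' :: t.takeWhile (fun c => c == '#') := by
      simp
    rw [htk]
    simp

-- ===== VERDICT (by name: the statement is the Claim_ definition above) =====
theorem firstCount_spec : Claim_equal_firstCount := by
  intro springs _
  unfold Spec_firstCount firstCount firstCount_alt
  rw [firstCount_eq_formula springs.toList, firstCount_alt_eq_formula springs.toList]
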